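-- pv_equiv track=rewrite | github.com/AAA354544/ai-news-digest-agent | app.py | _markdown_signal_preview
-- ===== SOURCE A (Python) =====
-- def _markdown_signal_preview(md_text: str | None) -> str:
--     if not md_text:
--         return ""
--     blocks: list[str] = []
--     current: list[str] = []
--     for raw_line in md_text.splitlines():
--         line = raw_line.strip()
--         if not line:
--             if current:
--                 blocks.append("\n".join(current))
--                 current = []
--             continue
--         if line.startswith("#") or line.startswith("Generated by"):
--             continue
--         current.append(raw_line)
--     if current:
--         blocks.append("\n".join(current))
--     return "\n\n".join(blocks[:3])
-- ===== SOURCE B (Python) =====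
-- def _markdown_signal_preview(md_text):
--     # Pre-filter header / "Generated by" lines, then group the survivors into
--     # blank-separated blocks with a two-pointer span scan that stops after 3 blocks.
--     lines = [l for l in (md_text or "").splitlines()
--              if not (l.strip().startswith("#") or l.strip().startswith("Generated by"))]
--     blocks = []
--     i = 0
--     while i < len(lines) and len(blocks) < 3:
--         if lines[i].strip():
--             j = i
--             while j < len(lines) and lines[j].strip():
--                 j += 1
--             blocks.append("\n".join(lines[i:j]))
--             i = j
--         else:
--             i += 1
--     return "\n\n".join(blocks)
-- ===== Notes on version B (the rewrite author's own statement) =====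
-- stated objective: alternative
-- what changed: A is a single-pass line-by-line state machine that skips headers inline and flushes a 'current' accumulator at blank lines; B first filters out header/'Generated by' lines, then groups the filtered lines into blank-separated blocks with a two-pointer span scan that stops as soon as 3 blocks are found.
import Mathlib
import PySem

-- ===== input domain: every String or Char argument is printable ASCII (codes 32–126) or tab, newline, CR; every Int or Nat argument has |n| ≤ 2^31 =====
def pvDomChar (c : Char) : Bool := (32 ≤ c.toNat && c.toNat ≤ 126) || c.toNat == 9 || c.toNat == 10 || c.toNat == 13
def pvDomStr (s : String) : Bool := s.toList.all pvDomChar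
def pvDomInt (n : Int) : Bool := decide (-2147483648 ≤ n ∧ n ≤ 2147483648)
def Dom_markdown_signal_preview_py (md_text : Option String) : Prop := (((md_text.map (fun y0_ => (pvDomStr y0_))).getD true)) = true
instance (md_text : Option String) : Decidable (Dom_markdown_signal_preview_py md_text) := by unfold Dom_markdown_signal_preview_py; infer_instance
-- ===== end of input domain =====

-- B pre-filters header/"Generated by" lines once, then groups the survivors into
-- blank-separated blocks with a span scan that stops after 3 blocks (objective: alternative).


-- ===== PORT A =====
-- final flush of A's 'current' accumulator
def pvFinish (r : List String × List String) : List String :=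
  if r.2.isEmpty then r.1 else r.1 ++ [PySem.Str.join "\n" r.2]

-- one iteration of A's for-loop: state = (blocks, current)
def pvStepA (st : List String × List String) (raw_line : String) : List String × List String :=
  let line := PySem.Str.strip raw_line
  if line = "" then
    if st.2.isEmpty then st else (st.1 ++ [PySem.Str.join "\n" st.2], [])
  else if PySem.Str.startswith line "#" || PySem.Str.startswith line "Generated by" then st
  else (st.1, st.2 ++ [raw_line])

def markdown_signal_preview_py (md_text : Option String) : String :=
  match md_text with
  | none => ""
  | some s =>
    if s = "" then ""
    else
      let blocks := pvFinish ((PySem.Str.splitlines s).foldl pvStepA ([], []))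
      PySem.Str.join "\n\n" (blocks.take 3)

-- ===== PORT B =====
-- keep a line iff its stripped form starts with neither "#" nor "Generated by"
def pvKeep (l : String) : Bool :=
  let t := PySem.Str.strip l
  !(PySem.Str.startswith t "#" || PySem.Str.startswith t "Generated by")

-- "non-blank" test used by the span scan
def pvNB (l : String) : Bool := PySem.Str.strip l != ""

-- Source B's while loop: remaining lines + remaining block budget (3 - len(blocks))
def pvAltLoop : List String → Nat → List String
  | _, 0 => []
  | [], _ + 1 => []
  | l :: rest, k + 1 =>
    if PySem.Str.strip l = "" then pvAltLoop rest (k + 1)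
    else PySem.Str.join "\n" (l :: rest.takeWhile pvNB) :: pvAltLoop (rest.dropWhile pvNB) k
termination_by xs _ => xs.length
decreasing_by
  · simp
  · simpa using Nat.lt_succ_of_le (List.length_dropWhile_le pvNB rest)

def markdown_signal_preview_py_alt (md_text : Option String) : String :=
  let lines := (PySem.Str.splitlines (md_text.getD "")).filter pvKeep
  PySem.Str.join "\n\n" (pvAltLoop lines 3)

-- ===== PRECONDITION & SPEC =====
def Spec_markdown_signal_preview_py (md_text : Option String) (out : String) : Prop := out = markdown_signal_preview_py_alt md_text
instance (md_text : Option String) (out : String) : Decidable (Spec_markdown_signal_preview_py md_text out) := by unfold Spec_markdown_signal_preview_py; infer_instance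

-- ===== CLAIM (what is proved, stated in full; the proofs are below) =====
def Claim_equal_markdown_signal_preview_py : Prop := ∀ (md_text : Option String), Dom_markdown_signal_preview_py md_text → Spec_markdown_signal_preview_py md_text (markdown_signal_preview_py md_text)

-- ===== LEMMAS AND PROOFS =====

-- A's grouping, as a recursion with explicit "current" accumulator
def pvGW : List String → List String → List (List String)
  | cur, [] => if cur.isEmpty then [] else [cur]
  | cur, l :: rest =>
    if PySem.Str.strip l = "" then (if cur.isEmpty then pvGW [] rest else cur :: pvGW [] rest)
    else pvGW (cur ++ [l]) rest

-- B's grouping, span-based, without the budget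
def pvGNB : List String → List (List String)
  | [] => []
  | l :: rest =>
    if PySem.Str.strip l = "" then pvGNB rest
    else (l :: rest.takeWhile pvNB) :: pvGNB (rest.dropWhile pvNB)
termination_by xs => xs.length
decreasing_by
  · simp
  · simpa using Nat.lt_succ_of_le (List.length_dropWhile_le pvNB rest)

theorem pvGW_eq_gnb (xs : List String) : ∀ cur,
    pvGW cur xs = if cur.isEmpty then pvGNB xs
      else (cur ++ xs.takeWhile pvNB) :: pvGNB (xs.dropWhile pvNB) := by
  induction xs with
  | nil =>
    intro cur
    simp [pvGW, pvGNB]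
  | cons l rest ih =>
    intro cur
    by_cases hb : PySem.Str.strip l = ""
    · have hnb : pvNB l = false := by simp [pvNB, hb]
      simp [pvGW, pvGNB, hb, hnb, ih []]
    · have hnb : pvNB l = true := by simp [pvNB, hb]
      have := ih (cur ++ [l])
      simp [pvGW, pvGNB, hb, hnb, this] at *

theorem pvAltLoop_eq_take (xs : List String) (k : Nat) :
    pvAltLoop xs k = ((pvGNB xs).map (PySem.Str.join "\n")).take k := by
  induction xs, k using pvAltLoop.induct with
  | case1 xs => simp [pvAltLoop]
  | case2 k => simp [pvAltLoop, pvGNB]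
  | case3 l rest k hb ih => simp [pvAltLoop, pvGNB, hb, ih]
  | case4 l rest k hb ih => simp [pvAltLoop, pvGNB, hb, ih]

-- the loop invariant of A's fold
theorem pvFoldA_eq (lines : List String) : ∀ bs cur,
    pvFinish (lines.foldl pvStepA (bs, cur))
    = bs ++ (pvGW cur (lines.filter pvKeep)).map (PySem.Str.join "\n") := by
  induction lines with
  | nil => intro bs cur; by_cases h : cur.isEmpty <;> simp [pvFinish, pvGW, h]
  | cons l rest ih =>
    intro bs cur
    by_cases hb : PySem.Str.strip l = ""
    · have hk : pvKeep l = true := by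
        simp [pvKeep, hb]
        constructor <;> simp [PySem.Chars.startswith]
      by_cases hc : cur.isEmpty
      · have hcur : cur = [] := by simpa [List.isEmpty_iff] using hc
        have hstep : pvStepA (bs, cur) l = (bs, []) := by simp [pvStepA, hb, hcur]
        rw [List.foldl_cons, hstep, ih bs []]
        simp [hk, pvGW, hb, hcur]
      · have hstep : pvStepA (bs, cur) l = (bs ++ [PySem.Str.join "\n" cur], []) := by
          simp [pvStepA, hb, hc]
        rw [List.foldl_cons, hstep, ih (bs ++ [PySem.Str.join "\n" cur]) []]
        simp [hk, pvGW, hb, hc]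
    · by_cases hh : (PySem.Str.startswith (PySem.Str.strip l) "#"
          || PySem.Str.startswith (PySem.Str.strip l) "Generated by") = true
      · have hk : pvKeep l = false := by
          simp only [pvKeep, Bool.not_eq_false']
          simpa using hh
        have hstep : pvStepA (bs, cur) l = (bs, cur) := by
          simp only [pvStepA]
          rw [if_neg hb, if_pos hh]
        rw [List.foldl_cons, hstep, ih bs cur]
        simp [hk]
      · have hk : pvKeep l = true := by simp only [pvKeep, Bool.not_eq_true']; simpa using hh
        have hstep : pvStepA (bs, cur) l = (bs, cur ++ [l]) := by
          simp only [pvStepA]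
          rw [if_neg hb, if_neg hh]
        rw [List.foldl_cons, hstep, ih bs (cur ++ [l])]
        simp [hk, pvGW, hb]

theorem pv_main (md_text : Option String) :
    markdown_signal_preview_py md_text = markdown_signal_preview_py_alt md_text := by
  have hsp : PySem.Str.splitlines "" = [] := by decide
  have hal : pvAltLoop [] 3 = [] := by simp [pvAltLoop]
  match md_text with
  | none =>
    simp only [markdown_signal_preview_py, markdown_signal_preview_py_alt, Option.getD_none,
      hsp, List.filter_nil, hal]
    decide
  | some s =>
    by_cases hs : s = ""
    · subst hs
      simp only [markdown_signal_preview_py, markdown_signal_preview_py_alt, if_pos rfl,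
        Option.getD_some, hsp, List.filter_nil, hal]
      decide
    · have h1 := pvFoldA_eq (PySem.Str.splitlines s) [] []
      have h2 := pvGW_eq_gnb ((PySem.Str.splitlines s).filter pvKeep) []
      have h3 := pvAltLoop_eq_take ((PySem.Str.splitlines s).filter pvKeep) 3
      simp only [List.isEmpty_nil, if_true] at h2
      simp only [markdown_signal_preview_py, markdown_signal_preview_py_alt, if_neg hs,
        Option.getD_some, h1, h2, h3, List.nil_append]

-- ===== VERDICT (by name: the statement is the Claim_ definition above) =====
theorem markdown_signal_preview_py_spec : Claim_equal_markdown_signal_preview_py := by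
  intro md_text _
  exact pv_main md_text
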